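-- pv_equiv track=rewrite | github.com/tuanngocfun/DNA_storage_locally_balance | src/lbcode/verifier.py | is_rll
-- ===== SOURCE A (Python) =====
-- def is_rll(x: str, k: int) -> bool:
--     """
--     Check if binary string x satisfies run-length-limited (RLL) constraint.
--
--     A string is k-RLL if no more than k consecutive identical bits appear.
--
--     Args:
--         x: Binary string
--         k: Maximum allowed run length
--
--     Returns:
--         True if max run length ≤ k
--
--     Example:
--         >>> is_rll("01010", 3)
--         True
--         >>> is_rll("0000", 3)
--         False  # Run of 4 zeros
--     """
--     if len(x) == 0:
--         return True
--
--     run = 1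
--     for i in range(1, len(x)):
--         if x[i] == x[i - 1]:
--             run += 1
--             if run > k:
--                 return False
--         else:
--             run = 1
--
--     return True
-- ===== SOURCE B (Python) =====
-- def is_rll(x: str, k: int) -> bool:
--     # Decompose: materialize maximal run lengths, then check each against max(k, 1)
--     # (a lone character is never a violation, matching the reference semantics).
--     runs = []
--     i, n = 0, len(x)
--     while i < n:
--         j = i + 1
--         while j < n and x[j] == x[i]:
--             j += 1
--         runs.append(j - i)
--         i = j
--     limit = max(k, 1)
--     return all(r <= limit for r in runs)
-- ===== Notes on version B (the rewrite author's own statement) =====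
-- stated objective: alternative
-- what changed: B splits the string into maximal run lengths in one scan and then checks each length against max(k,1), instead of A's index loop comparing x[i] with x[i-1] with an in-loop counter and early return.
import Mathlib
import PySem

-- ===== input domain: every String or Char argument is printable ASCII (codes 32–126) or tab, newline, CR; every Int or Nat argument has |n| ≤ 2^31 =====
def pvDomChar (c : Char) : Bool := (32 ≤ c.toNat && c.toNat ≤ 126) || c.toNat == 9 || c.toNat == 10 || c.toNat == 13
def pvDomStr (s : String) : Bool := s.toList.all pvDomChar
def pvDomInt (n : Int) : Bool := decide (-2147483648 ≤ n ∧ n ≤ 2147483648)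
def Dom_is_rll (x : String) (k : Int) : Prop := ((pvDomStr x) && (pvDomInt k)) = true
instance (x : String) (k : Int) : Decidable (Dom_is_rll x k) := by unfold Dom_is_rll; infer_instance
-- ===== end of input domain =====

-- B re-decomposes A's single indexed loop into: materialize the maximal run lengths, then
-- check every run length against max(k, 1); same O(n) cost, different structure (alternative).

-- ===== PORT A =====
-- for i in range(1, len(x)): compare x[i] with x[i-1], count the run, early-return False
def isRllLoopA (cs : List Char) (k : Int) : List Int → Int → Bool
  | [], _ => true
  | i :: rest, run =>
    if PySem.List.pyGet? cs i = PySem.List.pyGet? cs (i - 1) then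
      if run + 1 > k then false else isRllLoopA cs k rest (run + 1)
    else isRllLoopA cs k rest 1

def is_rll (x : String) (k : Int) : Bool :=
  let cs := x.toList
  if cs.length = 0 then true
  else isRllLoopA cs k (PySem.List.pyRange 1 (cs.length : Int) 1) 1

-- ===== PORT B =====
-- outer while loop of Source B: peel off one maximal run at a time, record its length
def runsB : List Char → List Nat
  | [] => []
  | c :: rest =>
      (1 + (rest.takeWhile (fun d => d == c)).length) ::
        runsB (rest.dropWhile (fun d => d == c))
  termination_by cs => cs.length
  decreasing_by
    simpa using Nat.lt_succ_of_le (List.length_dropWhile_le _ rest)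

def is_rll_alt (x : String) (k : Int) : Bool :=
  (runsB x.toList).all (fun r => decide ((r : Int) ≤ max k 1))

-- ===== PRECONDITION & SPEC =====
def Spec_is_rll (x : String) (k : Int) (out : Bool) : Prop := out = is_rll_alt x k
instance (x : String) (k : Int) (out : Bool) : Decidable (Spec_is_rll x k out) := by unfold Spec_is_rll; infer_instance

-- ===== CLAIM (what is proved, stated in full; the proofs are below) =====
def Claim_equal_is_rll : Prop := ∀ (x : String) (k : Int), Dom_is_rll x k → Spec_is_rll x k (is_rll x k)

-- ===== LEMMAS AND PROOFS =====

-- abbreviation for B's per-run predicate (proof-side only)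
def runOk (k : Int) (r : Nat) : Bool := decide ((r : Int) ≤ max k 1)

-- mid-level spec: A's loop seen as "previous char + current run length + remaining chars"
def chkA (k : Int) : Char → Int → List Char → Bool
  | _, _, [] => true
  | prev, run, c :: r =>
    if c = prev then
      if run + 1 > k then false else chkA k c (run + 1) r
    else chkA k c 1 r

-- the head-run condition of A equals B's max(k,1) test when the run starts at 1
theorem headRunCond (k : Int) (t : Nat) :
    ((decide (t = 0)) || decide ((1 : Int) + (t : Int) ≤ k)) = runOk k (1 + t) := by
  unfold runOk
  by_cases h : t = 0
  · subst h
    simp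
  · have h1 : (1 : Int) ≤ (t : Int) := by exact_mod_cast Nat.one_le_iff_ne_zero.mpr h
    simp only [h, decide_false, Bool.false_or, decide_eq_decide, le_max_iff]
    push_cast
    omega

-- inside a run that is not about to overflow, folding one more character into the count
theorem stepCond (k run : Int) (hk : ¬ run + 1 > k) (t : Nat) :
    ((decide (t = 0)) || decide (run + 1 + (t : Int) ≤ k)) = decide (run + ((t + 1 : Nat) : Int) ≤ k) := by
  by_cases ht : t = 0
  · subst ht
    simp only [decide_true, Bool.true_or, true_eq_decide_iff]
    push_cast
    omega
  · simp only [ht, decide_false, Bool.false_or, decide_eq_decide]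
    push_cast
    omega

-- chkA with a started run equals: head-run check, then B's run check on the rest
theorem chkA_eq_runs (k : Int) :
    ∀ (n : Nat) (rest : List Char), rest.length = n → ∀ (prev : Char) (run : Int), 1 ≤ run →
      chkA k prev run rest =
        ((decide ((rest.takeWhile (fun d => d == prev)).length = 0) ||
          decide (run + ((rest.takeWhile (fun d => d == prev)).length : Int) ≤ k)) &&
         (runsB (rest.dropWhile (fun d => d == prev))).all (runOk k)) := by
  intro n
  induction n with
  | zero =>
    intro rest hlen prev run _
    have : rest = [] := List.length_eq_zero_iff.mp hlen
    subst this
    simp [chkA, runsB]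
  | succ m ih =>
    intro rest hlen prev run hrun
    cases rest with
    | nil => simp at hlen
    | cons c r =>
      by_cases hc : c = prev
      · subst hc
        have htw : (c :: r).takeWhile (fun d => d == c) = c :: r.takeWhile (fun d => d == c) := by
          simp [List.takeWhile]
        have hdw : (c :: r).dropWhile (fun d => d == c) = r.dropWhile (fun d => d == c) := by
          simp [List.dropWhile]
        rw [htw, hdw]
        by_cases hk : run + 1 > k
        · have hz : decide ((c :: r.takeWhile (fun d => d == c)).length = 0) = false := by simp
          have hfalse : decide (run + (((c :: r.takeWhile (fun d => d == c)).length : Nat) : Int) ≤ k) = false := by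
            simp only [List.length_cons, decide_eq_false_iff_not]
            push_cast
            omega
          rw [hz, hfalse]
          simp [chkA, hk]
        · have hL : chkA k c run (c :: r) = chkA k c (run + 1) r := by
            simp [chkA, hk]
          have hrec := ih r (by simpa using Nat.succ_injective hlen) c (run + 1) (by omega)
          rw [hL, hrec, List.length_cons]
          congr 1
          exact stepCond k run hk _
      · have hbe : (c == prev) = false := by simp [hc]
        have htw : (c :: r).takeWhile (fun d => d == prev) = [] := by
          simp [List.takeWhile, hbe]
        have hdw : (c :: r).dropWhile (fun d => d == prev) = c :: r := by
          simp [List.dropWhile, hbe]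
        have hL : chkA k prev run (c :: r) = chkA k c 1 r := by
          simp [chkA, hc]
        have hrec := ih r (by simpa using Nat.succ_injective hlen) c 1 le_rfl
        have hrB : runsB (c :: r) =
            (1 + (r.takeWhile (fun d => d == c)).length) :: runsB (r.dropWhile (fun d => d == c)) := by
          rw [runsB]
        rw [hL, hrec, htw, hdw, hrB, List.all_cons, headRunCond]
        simp

-- A's indexed loop equals chkA on the dropped suffix
theorem loopA_eq_chkA (cs : List Char) (k : Int) :
    ∀ (n i : Nat), cs.length - i = n → 1 ≤ i → ∀ (prev : Char), cs[i - 1]? = some prev →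
      isRllLoopA cs k (PySem.List.pyRange (i : Int) (cs.length : Int) 1) =
        fun run => chkA k prev run (cs.drop i) := by
  intro n
  induction n with
  | zero =>
    intro i hn _ prev _
    have hge : cs.length ≤ i := by omega
    have h1 : PySem.List.pyRange (i : Int) (cs.length : Int) 1 = [] :=
      PySem.List.pyRange_one_eq_nil (by exact_mod_cast hge)
    have h2 : cs.drop i = [] := List.drop_eq_nil_of_le hge
    funext run
    rw [h1, h2]
    rfl
  | succ m ih =>
    intro i hn hi prev hprev
    have hlt : i < cs.length := by omega
    have hcons : PySem.List.pyRange (i : Int) (cs.length : Int) 1 =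
        (i : Int) :: PySem.List.pyRange ((i : Int) + 1) (cs.length : Int) 1 :=
      PySem.List.pyRange_one_cons (by exact_mod_cast hlt)
    have hgi : PySem.List.pyGet? cs (i : Int) = some cs[i] := by
      rw [PySem.List.pyGet?_natCast]
      exact List.getElem?_eq_getElem hlt
    have hgim : PySem.List.pyGet? cs ((i : Int) - 1) = some prev := by
      have hcast : ((i : Int) - 1) = ((i - 1 : Nat) : Int) := by omega
      rw [hcast, PySem.List.pyGet?_natCast, hprev]
    have hdrop : cs.drop i = cs[i] :: cs.drop (i + 1) := List.drop_eq_getElem_cons hlt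
    have hstep : ((i : Int) + 1) = ((i + 1 : Nat) : Int) := by push_cast; ring
    have hrec := ih (i + 1) (by omega) (by omega) cs[i] (by simp [List.getElem?_eq_getElem hlt])
    funext run
    rw [hcons]
    show (if PySem.List.pyGet? cs (i : Int) = PySem.List.pyGet? cs ((i : Int) - 1) then
            if run + 1 > k then false
            else isRllLoopA cs k (PySem.List.pyRange ((i : Int) + 1) (cs.length : Int) 1) (run + 1)
          else isRllLoopA cs k (PySem.List.pyRange ((i : Int) + 1) (cs.length : Int) 1) 1) =
      chkA k prev run (cs.drop i)
    rw [hgi, hgim, hdrop, hstep, hrec]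
    by_cases hc : cs[i] = prev
    · simp [chkA, hc]
    · have : ¬ (some cs[i] = some prev) := by simpa using hc
      simp [chkA, hc, this]

-- ===== VERDICT (by name: the statement is the Claim_ definition above) =====
theorem is_rll_spec : Claim_equal_is_rll := by
  intro x k _
  unfold Spec_is_rll is_rll is_rll_alt
  cases hcs : x.toList with
  | nil => simp [runsB]
  | cons c r =>
    have hne : (c :: r).length ≠ 0 := by simp
    simp only [if_neg hne]
    have hloop := loopA_eq_chkA (c :: r) k r.length 1 (by simp) (by omega) c (by simp)
    norm_num at hloop
    simp only [List.length_cons, Nat.cast_add, Nat.cast_one]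
    rw [congrFun hloop 1]
    have hchk := chkA_eq_runs k r.length r rfl c 1 le_rfl
    rw [hchk]
    have hrB : runsB (c :: r) =
        (1 + (r.takeWhile (fun d => d == c)).length) :: runsB (r.dropWhile (fun d => d == c)) := by
      rw [runsB]
    rw [hrB, List.all_cons, headRunCond]
    rfl
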